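-- pv_equiv track=rewrite | github.com/DaSonOfPoseidon/IT4320-Final | app.py | generate_ticket_number
-- ===== SOURCE A (Python) =====
-- def generate_ticket_number(passenger_name):
--     """
--     Generate e-ticket number based on passenger name
--
--     Pattern: Interleave passenger name letters with "INFOTC4320"
--     Example: "Alice" -> AIlNiFcOeTC4320
--
--     Args:
--         passenger_name (str): Passenger's full name
--
--     Returns:
--         str: E-ticket number based on passenger name
--     """
--     # Remove all whitespace from name
--     passenger_name = passenger_name.replace(" ", "")
--
--     separator_string = "INFOTC4320"
--
--     # Start with first letter (uppercase)
--     ticket = passenger_name[0].upper()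
--
--     # Get remaining letters (lowercase)
--     remaining_letters = passenger_name[1:].lower()
--
--     # Interleave remaining letters with separator string
--     max_length = max(len(remaining_letters), len(separator_string))
--     for i in range(max_length):
--         if i < len(separator_string):
--             ticket += separator_string[i]
--         if i < len(remaining_letters):
--             ticket += remaining_letters[i]
--
--     return ticket
-- ===== SOURCE B (Python) =====
-- def generate_ticket_number(passenger_name):
--     """Merge-style rewrite: first letter uppercased, then a recursive merge of
--     the separator string with the lowercased remaining letters."""
--     name = passenger_name.replace(" ", "")
--
--     def weave(xs, ys):
--         if not xs:
--             return ys
--         if not ys: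
--             return xs
--         return xs[0] + ys[0] + weave(xs[1:], ys[1:])
--
--     return name[0].upper() + weave("INFOTC4320", name[1:].lower())
-- ===== Notes on version B (the rewrite author's own statement) =====
-- stated objective: simpler
-- what changed: Replaces the index-counting for-loop over range(max(len,len)) with bounds tests by a recursive two-list merge (weave) that consumes both strings structurally and returns the leftover tail directly.
import Mathlib
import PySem

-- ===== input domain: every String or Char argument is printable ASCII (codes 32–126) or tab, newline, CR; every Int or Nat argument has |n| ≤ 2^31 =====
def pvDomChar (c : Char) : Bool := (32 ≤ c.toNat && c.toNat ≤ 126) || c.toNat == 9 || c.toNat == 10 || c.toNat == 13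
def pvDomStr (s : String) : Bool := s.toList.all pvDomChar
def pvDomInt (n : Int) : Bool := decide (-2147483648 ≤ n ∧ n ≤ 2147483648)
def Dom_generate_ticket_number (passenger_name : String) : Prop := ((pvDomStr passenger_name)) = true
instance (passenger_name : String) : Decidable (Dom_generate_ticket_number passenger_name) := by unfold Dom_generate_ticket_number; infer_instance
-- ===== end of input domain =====

-- B replaces A's index-counting loop by a structural merge of the two character
-- lists (objective: simpler decomposition, same cost).

-- ===== PORT A =====
-- the for-i-in-range(max_length) loop of A, as recursion on the remaining indices
def gtnLoopA (sep rem : List Char) (i maxLen : Nat) (ticket : List Char) : List Char :=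
  if i < maxLen then
    let t1 := if h : i < sep.length then ticket ++ [sep[i]] else ticket
    let t2 := if h : i < rem.length then t1 ++ [rem[i]] else t1
    gtnLoopA sep rem (i + 1) maxLen t2
  else ticket
termination_by maxLen - i

def generate_ticket_number (passenger_name : String) : String :=
  let name := PySem.Str.replace passenger_name " " ""
  let sep : List Char := "INFOTC4320".toList
  match PySem.Str.pyGet? name 0 with
  | none => ""   -- IndexError in Python; excluded by Pre_
  | some c =>
    let ticket : List Char := [PySem.Chars.upperChar c]
    let remaining := PySem.Chars.lower (PySem.List.slice name.toList (some 1) none)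
    String.ofList (gtnLoopA sep remaining 0 (Nat.max remaining.length sep.length) ticket)

-- ===== PORT B =====
-- recursive merge of the separator with the remaining letters (Source B's weave)
def gtnWeave : List Char → List Char → List Char
  | [], ys => ys
  | x :: xs, [] => x :: xs
  | x :: xs, y :: ys => x :: y :: gtnWeave xs ys

def generate_ticket_number_alt (passenger_name : String) : String :=
  let name := PySem.Str.replace passenger_name " " ""
  match PySem.Str.pyGet? name 0 with
  | none => ""   -- IndexError in Python; excluded by Pre_
  | some c =>
    String.ofList (PySem.Chars.upperChar c ::
      gtnWeave "INFOTC4320".toList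
        (PySem.Chars.lower (PySem.List.slice name.toList (some 1) none)))

-- ===== PRECONDITION & SPEC =====
-- Pre_ excludes exactly the inputs where A raises IndexError: names that are
-- empty after removing spaces (then passenger_name[0] fails).
def Pre_generate_ticket_number (passenger_name : String) : Prop :=
  PySem.Str.replace passenger_name " " "" ≠ ""
instance (passenger_name : String) : Decidable (Pre_generate_ticket_number passenger_name) := by
  unfold Pre_generate_ticket_number; infer_instance

def pvWitness_generate_ticket_number : String := "Alice"

def Spec_generate_ticket_number (passenger_name : String) (out : String) : Prop := out = generate_ticket_number_alt passenger_name
instance (passenger_name : String) (out : String) : Decidable (Spec_generate_ticket_number passenger_name out) := by unfold Spec_generate_ticket_number; infer_instance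

-- ===== CLAIM (what is proved, stated in full; the proofs are below) =====
def Claim_equal_generate_ticket_number : Prop := ∀ (passenger_name : String), Dom_generate_ticket_number passenger_name → Pre_generate_ticket_number passenger_name → Spec_generate_ticket_number passenger_name (generate_ticket_number passenger_name)

-- ===== LEMMAS AND PROOFS =====

theorem gtnWeave_nil_right (xs : List Char) : gtnWeave xs [] = xs := by
  cases xs <;> rfl

theorem gtnLoopA_eq_weave (sep rem : List Char) :
    ∀ n i t, Nat.max rem.length sep.length - i = n →
      gtnLoopA sep rem i (Nat.max rem.length sep.length) t
        = t ++ gtnWeave (sep.drop i) (rem.drop i) := by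
  have h1 : rem.length ≤ Nat.max rem.length sep.length := Nat.le_max_left _ _
  have h2 : sep.length ≤ Nat.max rem.length sep.length := Nat.le_max_right _ _
  intro n
  induction n with
  | zero =>
      intro i t h
      have hi : ¬ i < Nat.max rem.length sep.length := by omega
      rw [gtnLoopA, if_neg hi]
      have hs : sep.drop i = [] := List.drop_eq_nil_of_le (by omega)
      have hr : rem.drop i = [] := List.drop_eq_nil_of_le (by omega)
      simp [hs, hr, gtnWeave]
  | succ n ih =>
      intro i t h
      have hi : i < Nat.max rem.length sep.length := by omega
      rw [gtnLoopA, if_pos hi]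
      rw [ih (i + 1) _ (by omega)]
      by_cases hs : i < sep.length
      · have hds : sep.drop i = sep[i] :: sep.drop (i + 1) :=
          List.drop_eq_getElem_cons hs
        by_cases hr : i < rem.length
        · have hdr : rem.drop i = rem[i] :: rem.drop (i + 1) :=
            List.drop_eq_getElem_cons hr
          simp only [dif_pos hs, dif_pos hr, hds, hdr, gtnWeave, List.append_assoc,
            List.cons_append, List.nil_append]
        · have hdr : rem.drop i = [] := List.drop_eq_nil_of_le (by omega)
          have hdr' : rem.drop (i + 1) = [] := List.drop_eq_nil_of_le (by omega)
          simp only [dif_pos hs, dif_neg hr, hds, hdr, hdr', gtnWeave_nil_right,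
            List.append_assoc, List.cons_append, List.nil_append]
      · by_cases hr : i < rem.length
        · have hds : sep.drop i = [] := List.drop_eq_nil_of_le (by omega)
          have hds' : sep.drop (i + 1) = [] := List.drop_eq_nil_of_le (by omega)
          have hdr : rem.drop i = rem[i] :: rem.drop (i + 1) :=
            List.drop_eq_getElem_cons hr
          simp only [dif_neg hs, dif_pos hr, hds, hds', hdr, gtnWeave,
            List.append_assoc, List.cons_append, List.nil_append]
        · have hle : Nat.max rem.length sep.length ≤ i :=
            Nat.max_le.mpr ⟨by omega, by omega⟩
          omega

-- ===== VERDICT (by name: the statement is the Claim_ definition above) =====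
theorem generate_ticket_number_spec : Claim_equal_generate_ticket_number := by
  intro passenger_name _ _
  unfold Spec_generate_ticket_number generate_ticket_number generate_ticket_number_alt
  cases h : PySem.Str.pyGet? (PySem.Str.replace passenger_name " " "") 0 with
  | none => simp only [h]
  | some c =>
      simp only [h]
      rw [gtnLoopA_eq_weave _ _ _ 0 _ rfl]
      simp only [List.drop_zero, List.singleton_append]
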